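-- pv_equiv track=rewrite | github.com/liskos/leonenko | ege15/78.py | f
-- ===== SOURCE A (Python) =====
-- def f(a):
--     p = range(6,17)
--     q = range(30,51)
--     for x in range(1, 1001):
--         f = (not(x in a) or (x in q)) or (x in p)
--         if not f:
--             return False
--     return True
-- ===== SOURCE B (Python) =====
-- def f(a):
--     # True iff no element of a falls in a forbidden interval: the complement of
--     # [6,16] | [30,50] inside [1,1000], written as explicit closed intervals.
--     FORBIDDEN = ((1, 5), (17, 29), (51, 1000))
--     return not any(lo <= x <= hi for x in a for lo, hi in FORBIDDEN)
-- ===== Notes on version B (the rewrite author's own statement) =====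
-- stated objective: alternative
-- what changed: Instead of scanning all x in 1..1000 and testing x in a / x in range objects, B makes one pass over the input list and tests each element arithmetically against a tuple of three explicit forbidden intervals (the complement of the allowed ranges); the universe loop and all membership containers disappear.
import Mathlib
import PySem

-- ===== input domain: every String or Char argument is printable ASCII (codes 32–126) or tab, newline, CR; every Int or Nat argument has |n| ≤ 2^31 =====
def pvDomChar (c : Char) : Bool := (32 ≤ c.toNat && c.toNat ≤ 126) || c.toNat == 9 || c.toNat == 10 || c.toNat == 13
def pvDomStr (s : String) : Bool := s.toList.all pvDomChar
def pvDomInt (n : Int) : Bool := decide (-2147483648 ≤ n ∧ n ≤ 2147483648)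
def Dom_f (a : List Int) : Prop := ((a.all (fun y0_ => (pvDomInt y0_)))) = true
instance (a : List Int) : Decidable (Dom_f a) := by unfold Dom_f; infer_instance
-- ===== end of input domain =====

-- B replaces A's 1000-iteration universe scan (membership tests against a and two
-- ranges) by one arithmetic pass over the input testing the complement intervals.

-- ===== PORT A =====
-- the loop body: for x in range(1,1001): f = …; if not f: return False / then return True
def fLoop (a : List Int) : List Int → Bool
  | [] => true
  | x :: rest =>
      let fv := (!(a.contains x) || (PySem.List.pyRange 30 51 1).contains x)
                  || (PySem.List.pyRange 6 17 1).contains x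
      if !fv then false else fLoop a rest

def f (a : List Int) : Bool := fLoop a (PySem.List.pyRange 1 1001 1)

-- ===== PORT B =====
def forbiddenIntervals : List (Int × Int) := [(1, 5), (17, 29), (51, 1000)]

def f_alt (a : List Int) : Bool :=
  !(a.any (fun x => forbiddenIntervals.any (fun p => decide (p.1 ≤ x ∧ x ≤ p.2))))

-- ===== PRECONDITION & SPEC =====
def Spec_f (a : List Int) (out : Bool) : Prop := out = f_alt a
instance (a : List Int) (out : Bool) : Decidable (Spec_f a out) := by unfold Spec_f; infer_instance

-- ===== CLAIM (what is proved, stated in full; the proofs are below) =====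
def Claim_equal_f : Prop := ∀ (a : List Int), Dom_f a → Spec_f a (f a)

-- ===== LEMMAS AND PROOFS =====

theorem fLoop_eq_all (a : List Int) (l : List Int) :
    fLoop a l = l.all (fun x =>
      (!(a.contains x) || (PySem.List.pyRange 30 51 1).contains x)
        || (PySem.List.pyRange 6 17 1).contains x) := by
  induction l with
  | nil => rfl
  | cons x rest ih =>
      simp only [fLoop, List.all_cons, ih]
      cases hv : ((!(a.contains x) || (PySem.List.pyRange 30 51 1).contains x)
        || (PySem.List.pyRange 6 17 1).contains x)
      · rfl
      · rfl

theorem f_eq_alt (a : List Int) : f a = f_alt a := by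
  rw [Bool.eq_iff_iff]
  unfold f f_alt
  rw [fLoop_eq_all]
  simp only [List.all_eq_true, Bool.not_eq_true', List.any_eq_false, List.any_eq_true,
    forbiddenIntervals, PySem.List.mem_pyRange_one, Bool.or_eq_true, List.contains_eq_mem,
    decide_eq_true_eq, List.mem_cons, List.not_mem_nil,
    decide_eq_false_iff_not]
  constructor
  · intro h x hxa hex
    obtain ⟨p, hp, hlo, hhi⟩ := hex
    have hb : 1 ≤ x ∧ x ≤ 1000 := by
      rcases hp with he | he | he | he
      · rw [he] at hlo hhi; exact ⟨hlo, by omega⟩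
      · rw [he] at hlo hhi; constructor <;> omega
      · rw [he] at hlo hhi; constructor <;> omega
      · exact he.elim
    have h1 := h x ⟨hb.1, by omega⟩
    have hnot : ¬ (30 ≤ x ∧ x < 51) ∧ ¬ (6 ≤ x ∧ x < 17) := by
      rcases hp with he | he | he | he
      · rw [he] at hlo hhi; simp only [] at hlo hhi; constructor <;> intro hc <;> omega
      · rw [he] at hlo hhi; simp only [] at hlo hhi; constructor <;> intro hc <;> omega
      · rw [he] at hlo hhi; simp only [] at hlo hhi; constructor <;> intro hc <;> omega
      · exact he.elim
    rcases h1 with (hna | h30) | h6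
    · exact hna hxa
    · exact hnot.1 h30
    · exact hnot.2 h6
  · intro h x hx
    by_cases hxa : x ∈ a
    · by_cases h1 : 30 ≤ x ∧ x < 51
      · exact Or.inl (Or.inr h1)
      · by_cases h2 : 6 ≤ x ∧ x < 17
        · exact Or.inr h2
        · exfalso
          apply h x hxa
          by_cases h3 : x ≤ 5
          · exact ⟨(1, 5), Or.inl rfl, by omega, by omega⟩
          · by_cases h4 : x ≤ 29
            · exact ⟨(17, 29), Or.inr (Or.inl rfl), by omega, by omega⟩
            · exact ⟨(51, 1000), Or.inr (Or.inr (Or.inl rfl)), by omega, by omega⟩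
    · exact Or.inl (Or.inl hxa)

-- ===== VERDICT (by name: the statement is the Claim_ definition above) =====
theorem f_spec : Claim_equal_f := by
  intro a _
  exact f_eq_alt a
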